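-- pv_equiv track=rewrite | github.com/lggruspe/sausage | sausage/wildcards.py | find_wildcards
-- ===== SOURCE A (Python) =====
-- import typing as t
--
-- def find_wildcards(string: str) -> t.Iterator[int]:
--     """Find '%'s in string."""
--     i = len(string)
--     while i >= 0:
--         j = string.rfind("%", 0, i)
--         if j < 0:
--             break
--         if j == 0 or string[j - 1] != "%":
--             yield j
--         i = j
-- ===== SOURCE B (Python) =====
-- def find_wildcards(string):
--     """Find '%'s in string."""
--     starts = []
--     prev = None
--     for i, c in enumerate(string):
--         if c == "%" and prev != "%":
--             starts.append(i)
--         prev = c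
--     yield from reversed(starts)
-- ===== Notes on version B (the rewrite author's own statement) =====
-- stated objective: simpler
-- what changed: Replaced A's backward rfind-jumping while-loop (emitting positions directly in descending order) by a single forward pass that tracks the previous character, collects the positions of '%' not preceded by '%' in ascending order, and reverses the collected list at the end.
import Mathlib
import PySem

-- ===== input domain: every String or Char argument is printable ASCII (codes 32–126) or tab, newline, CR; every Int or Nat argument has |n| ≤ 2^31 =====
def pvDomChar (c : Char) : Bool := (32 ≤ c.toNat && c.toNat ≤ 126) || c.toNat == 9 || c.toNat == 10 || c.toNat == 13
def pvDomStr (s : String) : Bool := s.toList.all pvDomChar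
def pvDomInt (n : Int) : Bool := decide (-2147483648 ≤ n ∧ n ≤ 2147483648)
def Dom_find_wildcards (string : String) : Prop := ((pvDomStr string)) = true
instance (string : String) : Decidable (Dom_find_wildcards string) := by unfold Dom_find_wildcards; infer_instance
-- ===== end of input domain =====

-- B replaces A's backward rfind-jumping loop by one forward pass that tracks the previous
-- character, collects run-start positions ascending, and reverses at the end (objective:
-- simpler). A is a generator; both ports return the list of yielded positions.

-- ===== PORT A =====
-- string.rfind("%", 0, i): largest j < i with string[j] = '%', as an Option (none = -1)
def pvRfindPct (cs : List Char) : Nat → Option Nat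
  | 0 => none
  | i + 1 => if cs[i]? = some '%' then some i else pvRfindPct cs i

theorem pvRfindPct_lt {cs : List Char} {i j : Nat} (h : pvRfindPct cs i = some j) : j < i := by
  induction i with
  | zero => simp [pvRfindPct] at h
  | succ n ih =>
    unfold pvRfindPct at h
    split at h
    · injection h with h; omega
    · exact Nat.lt_succ_of_lt (ih h)

-- the 'while i >= 0' loop of A: break on rfind < 0, maybe yield j, set i = j
def pvLoopA (cs : List Char) (i : Nat) : List Int :=
  match h : pvRfindPct cs i with
  | none => []
  | some j =>
    (if j = 0 ∨ cs[j - 1]? ≠ some '%' then [(j : Int)] else []) ++ pvLoopA cs j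
termination_by i
decreasing_by exact pvRfindPct_lt h

def find_wildcards (string : String) : List Int :=
  pvLoopA string.toList string.toList.length

-- ===== PORT B =====
-- for i, c in enumerate(string): if c == '%' and prev != '%': starts.append(i); prev = c
-- (prev = None initially → Option Char, none initially)
def pvFwd (prev : Option Char) (i : Nat) : List Char → List Int
  | [] => []
  | c :: rest =>
    (if c = '%' ∧ prev ≠ some '%' then [(i : Int)] else []) ++ pvFwd (some c) (i + 1) rest

def find_wildcards_alt (string : String) : List Int :=
  (pvFwd none 0 string.toList).reverse

-- ===== PRECONDITION & SPEC =====
def Spec_find_wildcards (string : String) (out : List Int) : Prop := out = find_wildcards_alt string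
instance (string : String) (out : List Int) : Decidable (Spec_find_wildcards string out) := by unfold Spec_find_wildcards; infer_instance

-- ===== CLAIM (what is proved, stated in full; the proofs are below) =====
def Claim_equal_find_wildcards : Prop := ∀ (string : String), Dom_find_wildcards string → Spec_find_wildcards string (find_wildcards string)

-- ===== LEMMAS AND PROOFS =====

-- 'good' positions: '%' not preceded by '%'
def pvGood (cs : List Char) (j : Nat) : Bool :=
  (cs[j]? == some '%') && (decide (j = 0) || !(cs[j - 1]? == some '%'))

-- descending per-index helper: bridge between the two loop shapes
def pvDesc (cs : List Char) : Nat → List Int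
  | 0 => []
  | i + 1 => (if pvGood cs i then [(i : Int)] else []) ++ pvDesc cs i

theorem pvRfindPct_none {cs : List Char} {i : Nat} (h : pvRfindPct cs i = none) :
    ∀ k, k < i → cs[k]? ≠ some '%' := by
  induction i with
  | zero => intro k hk; omega
  | succ n ih =>
    unfold pvRfindPct at h
    split at h
    · exact absurd h (by simp)
    · intro k hk
      rcases Nat.lt_succ_iff_lt_or_eq.mp hk with h' | h'
      · exact ih h k h'
      · subst h'; assumption

theorem pvRfindPct_some {cs : List Char} {i j : Nat} (h : pvRfindPct cs i = some j) :
    cs[j]? = some '%' ∧ ∀ k, j < k → k < i → cs[k]? ≠ some '%' := by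
  induction i with
  | zero => simp [pvRfindPct] at h
  | succ n ih =>
    unfold pvRfindPct at h
    split at h
    · rename_i hc
      obtain rfl : n = j := by injection h
      exact ⟨hc, fun k hk1 hk2 => absurd (by omega : k < k) (lt_irrefl k)⟩
    · rename_i hc
      obtain ⟨h1, h2⟩ := ih h
      refine ⟨h1, fun k hk1 hk2 => ?_⟩
      rcases Nat.lt_succ_iff_lt_or_eq.mp hk2 with h' | h'
      · exact h2 k hk1 h'
      · subst h'; exact hc

-- pvDesc skips a block of non-'%' positions
theorem pvDesc_skip (cs : List Char) (m i : Nat) (hm : m ≤ i)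
    (h : ∀ k, m ≤ k → k < i → cs[k]? ≠ some '%') : pvDesc cs i = pvDesc cs m := by
  induction i with
  | zero => obtain rfl : m = 0 := Nat.le_zero.mp hm; rfl
  | succ n ih =>
    rcases Nat.eq_or_lt_of_le hm with h' | h'
    · rw [h']
    · have hn : cs[n]? ≠ some '%' := h n (by omega) (by omega)
      have e : pvDesc cs (n + 1) = pvDesc cs n := by
        show (if pvGood cs n then [(n : Int)] else []) ++ pvDesc cs n = pvDesc cs n
        rw [if_neg (by simp [pvGood, hn])]; rfl
      rw [e]
      exact ih (by omega) (fun k hk1 hk2 => h k hk1 (by omega))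

theorem pvLoopA_eq_pvDesc (cs : List Char) (i : Nat) : pvLoopA cs i = pvDesc cs i := by
  induction i using Nat.strong_induction_on with
  | _ i ih =>
    unfold pvLoopA
    split
    · rename_i h
      rw [pvDesc_skip cs 0 i (Nat.zero_le i) (fun k _ hk => pvRfindPct_none h k hk)]
      rfl
    · rename_i j h
      have hj := pvRfindPct_lt h
      obtain ⟨hc, hblock⟩ := pvRfindPct_some h
      rw [ih j hj]
      rw [pvDesc_skip cs (j + 1) i hj (fun k hk1 hk2 => hblock k hk1 hk2)]
      conv_rhs => rw [pvDesc]
      by_cases hcond : j = 0 ∨ cs[j - 1]? ≠ some '%'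
      · rw [if_pos hcond, if_pos (by simp [pvGood, hc]; tauto)]
      · rw [if_neg hcond, if_neg (by push Not at hcond; simp [pvGood, hcond.1, hcond.2])]

-- pvDesc is the reversed filter of good indices below i
theorem pvDesc_eq_filter (cs : List Char) (i : Nat) :
    pvDesc cs i = (((List.range i).filter (pvGood cs)).map Int.ofNat).reverse := by
  induction i with
  | zero => rfl
  | succ n ih =>
    show (if pvGood cs n then [(n : Int)] else []) ++ pvDesc cs n = _
    rw [ih, List.range_succ]
    by_cases h : pvGood cs n <;> simp [h]

-- pvFwd on the suffix of cs starting at i, with prev the character at i-1 (none at 0),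
-- is the ascending filter of good indices from i on
theorem pvFwd_eq_filter (cs : List Char) : ∀ (suf pre : List Char) (prev : Option Char),
    cs = pre ++ suf → prev = pre.getLast? → (pre = [] → prev = none) →
    pvFwd prev pre.length suf
      = ((List.range' pre.length suf.length).filter (pvGood cs)).map Int.ofNat := by
  intro suf
  induction suf with
  | nil => intro pre prev _ _ _; rfl
  | cons c rest ih =>
    intro pre prev hcs hprev hnil
    have hget : cs[pre.length]? = some c := by
      subst hcs; simp
    have hcond : (c = '%' ∧ prev ≠ some '%') ↔ pvGood cs pre.length = true := by
      simp only [pvGood, hget, Bool.and_eq_true, beq_iff_eq, Option.some.injEq,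
        Bool.or_eq_true, decide_eq_true_eq, Bool.not_eq_true', beq_eq_false_iff_ne]
      constructor
      · rintro ⟨rfl, hp⟩
        refine ⟨rfl, ?_⟩
        cases pre with
        | nil => left; rfl
        | cons a as =>
          right
          have : cs[(a :: as : List Char).length - 1]? = (a :: as : List Char).getLast? := by
            subst hcs
            rw [List.getElem?_append_left (by simp)]
            simp [List.getLast?_eq_getElem?]
          rw [this, ← hprev]
          exact fun h => hp (by simp [h])
      · rintro ⟨rfl, hp⟩
        refine ⟨rfl, ?_⟩
        cases pre with
        | nil => rw [hnil rfl]; simp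
        | cons a as =>
          rcases hp with hp | hp
          · simp at hp
          · have : cs[(a :: as : List Char).length - 1]? = (a :: as : List Char).getLast? := by
              subst hcs
              rw [List.getElem?_append_left (by simp)]
              simp [List.getLast?_eq_getElem?]
            rw [this, ← hprev] at hp
            intro h; rw [h] at hp; exact hp rfl
    have step := ih (pre ++ [c]) (some c) (by simp [hcs]) (by simp) (by simp)
    simp only [List.length_append, List.length_cons, List.length_nil] at step
    show (if c = '%' ∧ prev ≠ some '%' then [(pre.length : Int)] else [])
        ++ pvFwd (some c) (pre.length + 1) rest = _
    have step' : pvFwd (some c) (pre.length + 1) rest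
        = ((List.range' (pre.length + 1) rest.length).filter (pvGood cs)).map Int.ofNat := by
      simpa using step
    rw [step', show (c :: rest).length = rest.length + 1 from rfl, List.range'_succ,
      List.filter_cons]
    by_cases h : c = '%' ∧ prev ≠ some '%'
    · rw [if_pos h, if_pos (hcond.mp h)]; simp
    · rw [if_neg h, if_neg (fun hg => h (hcond.mpr hg))]; simp

-- ===== VERDICT (by name: the statement is the Claim_ definition above) =====
theorem find_wildcards_spec : Claim_equal_find_wildcards := by
  intro s _
  unfold Spec_find_wildcards find_wildcards find_wildcards_alt
  rw [pvLoopA_eq_pvDesc, pvDesc_eq_filter]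
  have h := pvFwd_eq_filter s.toList s.toList [] none (by simp) (by simp) (fun _ => rfl)
  simp only [List.length_nil ] at h
  rw [h, List.range_eq_range']
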